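-- pv_equiv track=rewrite | github.com/wyattowalsh/agents | tests/test_nerdbot_schema_contracts.py | _extract_entry_block
-- ===== SOURCE A (Python) =====
-- def _extract_entry_block(text: str) -> str:
--     """Return the first activity-log entry block starting with ``### [``."""
--     lines = text.splitlines()
--     start = None
--     for i, line in enumerate(lines):
--         if line.strip().startswith("### ["):
--             start = i
--             break
--     if start is None:
--         return ""
--     end = len(lines)
--     for i in range(start + 1, len(lines)):
--         line = lines[i].strip()
--         # Another heading or horizontal rule signals end of the block
--         if line.startswith("## ") or line.startswith("### [") or line == "---":
--             end = i
--             break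
--     return "\n".join(lines[start:end])
-- ===== SOURCE B (Python) =====
-- def _extract_entry_block(text: str) -> str:
--     """Single pass carrying a boolean flag and an accumulator instead of two index-finding passes."""
--     collecting = False
--     acc = []
--     for line in text.splitlines():
--         s = line.strip()
--         if not collecting:
--             if s.startswith("### ["):
--                 collecting = True
--                 acc.append(line)
--         else:
--             if s.startswith("## ") or s.startswith("### [") or s == "---":
--                 break
--             acc.append(line)
--     if not acc:
--         return ""
--     return "\n".join(acc)
-- ===== Notes on version B (the rewrite author's own statement) =====
-- stated objective: alternative
-- what changed: Replaced A's two index-finding passes plus a slice-and-join with a single pass over the lines that carries a boolean flag and a list accumulator.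
import Mathlib
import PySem

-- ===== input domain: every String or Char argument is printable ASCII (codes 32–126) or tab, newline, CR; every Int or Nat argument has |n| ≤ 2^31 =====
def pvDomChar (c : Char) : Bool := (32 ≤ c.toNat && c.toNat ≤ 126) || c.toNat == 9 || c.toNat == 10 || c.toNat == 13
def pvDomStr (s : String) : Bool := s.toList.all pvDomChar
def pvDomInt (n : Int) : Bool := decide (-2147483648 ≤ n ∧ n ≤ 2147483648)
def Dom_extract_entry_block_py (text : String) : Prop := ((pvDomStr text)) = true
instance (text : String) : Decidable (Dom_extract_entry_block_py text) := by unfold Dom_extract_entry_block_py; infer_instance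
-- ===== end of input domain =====

-- B replaces A's two index-finding passes + slice with one pass carrying a boolean flag and an accumulator (alternative decomposition, same cost).

-- ===== PORT A =====
-- first loop of A: index of the first line whose strip() starts with "### [" (enumerate with break)
def pvFindStartA : List String → Nat → Option Nat
  | [], _ => none
  | l :: ls, i =>
    if PySem.Str.startswith (PySem.Str.strip l) "### [" then some i
    else pvFindStartA ls (i + 1)

-- second loop of A: for i in range(start+1, len(lines)) with break; default end = len(lines)
def pvFindEndA (lines : List String) (i : Nat) : Nat :=
  if h : i < lines.length then
    let line := PySem.Str.strip lines[i]
    if PySem.Str.startswith line "## " || PySem.Str.startswith line "### [" || line == "---" then i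
    else pvFindEndA lines (i + 1)
  else lines.length
termination_by lines.length - i

def extract_entry_block_py (text : String) : String :=
  let lines := PySem.Str.splitlines text
  match pvFindStartA lines 0 with
  | none => ""
  | some start =>
    let e := pvFindEndA lines (start + 1)
    PySem.Str.join "\n" (PySem.List.slice lines (some (start : Int)) (some (e : Int)))

-- ===== PORT B =====
-- B's loop after the flag became true: append until a terminator line, then break
def pvCollectB : List String → List String
  | [] => []
  | l :: ls =>
    let s := PySem.Str.strip l
    if PySem.Str.startswith s "## " || PySem.Str.startswith s "### [" || s == "---" then []
    else l :: pvCollectB ls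

-- B's loop while the flag is false: skip until the first "### [" line
def pvScanB : List String → List String
  | [] => []
  | l :: ls =>
    if PySem.Str.startswith (PySem.Str.strip l) "### [" then l :: pvCollectB ls
    else pvScanB ls

def extract_entry_block_py_alt (text : String) : String :=
  let acc := pvScanB (PySem.Str.splitlines text)
  if acc = [] then "" else PySem.Str.join "\n" acc

-- ===== PRECONDITION & SPEC =====
def Spec_extract_entry_block_py (text : String) (out : String) : Prop := out = extract_entry_block_py_alt text
instance (text : String) (out : String) : Decidable (Spec_extract_entry_block_py text out) := by unfold Spec_extract_entry_block_py; infer_instance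

-- ===== CLAIM (what is proved, stated in full; the proofs are below) =====
def Claim_equal_extract_entry_block_py : Prop := ∀ (text : String), Dom_extract_entry_block_py text → Spec_extract_entry_block_py text (extract_entry_block_py text)

-- ===== LEMMAS AND PROOFS =====

theorem pvFindStartA_shift (ls : List String) (i : Nat) :
    pvFindStartA ls (i + 1) = (pvFindStartA ls i).map (· + 1) := by
  induction ls generalizing i with
  | nil => simp [pvFindStartA]
  | cons l ls ih =>
    simp only [pvFindStartA]
    split
    · simp
    · exact ih (i + 1)

theorem pvFindEndA_shift (l : String) (ls : List String) (i : Nat) :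
    pvFindEndA (l :: ls) (i + 1) = pvFindEndA ls i + 1 := by
  fun_induction pvFindEndA ls i with
  | case1 i h line hstop =>
    rw [pvFindEndA]
    simp only [List.length_cons, List.getElem_cons_succ]
    rw [dif_pos (by omega)]
    simp only [line] at hstop
    rw [if_pos hstop]
  | case2 i h line hstop ih =>
    rw [pvFindEndA]
    simp only [List.length_cons, List.getElem_cons_succ]
    rw [dif_pos (by omega)]
    simp only [line] at hstop
    rw [if_neg hstop]
    exact ih
  | case3 i h =>
    rw [pvFindEndA]
    rw [dif_neg (by simp; omega)]
    simp

theorem pvFindEndA_take (ls : List String) :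
    ls.take (pvFindEndA ls 0) = pvCollectB ls := by
  induction ls with
  | nil => simp [pvFindEndA, pvCollectB]
  | cons l ls ih =>
    rw [pvFindEndA, pvCollectB]
    simp only [List.length_cons, List.getElem_cons_zero]
    rw [dif_pos (by omega)]
    split
    · simp
    · rw [pvFindEndA_shift, List.take_succ_cons, ih]

theorem core_eq (ls : List String) :
    (match pvFindStartA ls 0 with
     | none => ""
     | some start =>
       PySem.Str.join "\n"
         (PySem.List.slice ls (some (start : Int)) (some ((pvFindEndA ls (start + 1) : Nat) : Int))))
    = (if pvScanB ls = [] then "" else PySem.Str.join "\n" (pvScanB ls)) := by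
  induction ls with
  | nil => simp [pvFindStartA, pvScanB]
  | cons l ls ih =>
    by_cases hs : PySem.Str.startswith (PySem.Str.strip l) "### [" = true
    · simp only [pvFindStartA, pvScanB, if_pos hs]
      rw [pvFindEndA_shift l ls 0]
      rw [PySem.List.slice_natCast]
      simp only [List.drop_zero, Nat.sub_zero, List.take_succ_cons, pvFindEndA_take]
      simp
    · simp only [pvFindStartA, pvScanB, if_neg hs]
      rw [pvFindStartA_shift]
      cases hfs : pvFindStartA ls 0 with
      | none =>
        simp only [hfs, Option.map_none] at *
        simpa [hfs] using ih
      | some t =>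
        simp only [Option.map_some]
        rw [pvFindEndA_shift l ls (t + 1)]
        simp only [hfs] at ih
        rw [PySem.List.slice_natCast]
        simp only [List.drop_succ_cons]
        rw [show (pvFindEndA ls (t + 1) + 1) - (t + 1) = pvFindEndA ls (t + 1) - t by omega]
        rw [PySem.List.slice_natCast] at ih
        exact ih

-- ===== VERDICT (by name: the statement is the Claim_ definition above) =====
theorem extract_entry_block_py_spec : Claim_equal_extract_entry_block_py := by
  intro text _
  unfold Spec_extract_entry_block_py extract_entry_block_py extract_entry_block_py_alt
  exact core_eq (PySem.Str.splitlines text)
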